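-- pv_equiv track=rewrite | github.com/mp3monster/fluent-bit-opamp | scripts/build_and_publish_wheels.py | _requirement_name
-- ===== SOURCE A (Python) =====
-- def _requirement_name(requirement: str) -> str:
--     """Extract dependency package name from Requires-Dist entry."""
--     cleaned = requirement.split(";", 1)[0].strip()
--     stop_chars = [" ", "(", "[", "!", "<", ">", "=", "~", ";"]
--     end = len(cleaned)
--     for char in stop_chars:
--         pos = cleaned.find(char)
--         if pos != -1:
--             end = min(end, pos)
--     return cleaned[:end].strip()
-- ===== SOURCE B (Python) =====
-- def _requirement_name(requirement: str) -> str: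
--     """Extract dependency package name from Requires-Dist entry."""
--     cleaned = requirement.split(";", 1)[0].strip()
--     stop_set = {" ", "(", "[", "!", "<", ">", "=", "~", ";"}
--     for i, ch in enumerate(cleaned):
--         if ch in stop_set:
--             return cleaned[:i].strip()
--     return cleaned.strip()
-- ===== Notes on version B (the rewrite author's own statement) =====
-- stated objective: simpler
-- what changed: A runs up to nine full find() scans over the cleaned string and takes the min of the hit positions before slicing; B makes one left-to-right pass and cuts at the first stop character it meets.
import Mathlib
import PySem

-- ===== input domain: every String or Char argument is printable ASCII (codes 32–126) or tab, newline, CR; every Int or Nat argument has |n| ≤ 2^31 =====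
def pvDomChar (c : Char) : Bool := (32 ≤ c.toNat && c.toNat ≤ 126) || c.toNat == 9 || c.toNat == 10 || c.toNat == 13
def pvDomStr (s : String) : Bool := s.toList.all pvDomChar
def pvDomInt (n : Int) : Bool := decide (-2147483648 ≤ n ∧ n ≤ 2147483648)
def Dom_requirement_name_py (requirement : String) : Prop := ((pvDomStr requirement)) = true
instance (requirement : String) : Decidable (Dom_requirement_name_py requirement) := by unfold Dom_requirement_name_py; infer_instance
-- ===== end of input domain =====

-- B replaces A's up-to-nine full `find` scans combined with `min` by a single
-- left-to-right pass that stops at the first stop character (objective: simpler single pass).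

-- ===== PORT A =====
def requirement_name_py (requirement : String) : String :=
  let cleaned := PySem.Chars.strip (((PySem.Chars.splitMax? requirement.toList [';'] 1).getD []).headD [])
  let stop_chars : List Char := [' ', '(', '[', '!', '<', '>', '=', '~', ';']
  let endv : Int := stop_chars.foldl (fun e c =>
      let pos := PySem.Chars.find cleaned [c]
      if pos ≠ -1 then min e pos else e) (cleaned.length : Int)
  String.ofList (PySem.Chars.strip (PySem.List.slice cleaned none (some endv)))

-- ===== PORT B =====
-- the single pass of Source B: walk `cleaned`; at the first stop character return the
-- prefix seen so far; if none occurs, the whole list comes back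
def pvScanStop (stop : List Char) : List Char → List Char
  | [] => []
  | c :: cs => if c ∈ stop then [] else c :: pvScanStop stop cs

def requirement_name_py_alt (requirement : String) : String :=
  let cleaned := PySem.Chars.strip (((PySem.Chars.splitMax? requirement.toList [';'] 1).getD []).headD [])
  let stop_set : PySem.Set Char := PySem.Set.ofList [' ', '(', '[', '!', '<', '>', '=', '~', ';']
  String.ofList (PySem.Chars.strip (pvScanStop stop_set cleaned))

-- ===== PRECONDITION & SPEC =====
def Spec_requirement_name_py (requirement : String) (out : String) : Prop := out = requirement_name_py_alt requirement
instance (requirement : String) (out : String) : Decidable (Spec_requirement_name_py requirement out) := by unfold Spec_requirement_name_py; infer_instance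

-- ===== CLAIM (what is proved, stated in full; the proofs are below) =====
def Claim_equal_requirement_name_py : Prop := ∀ (requirement : String), Dom_requirement_name_py requirement → Spec_requirement_name_py requirement (requirement_name_py requirement)

-- ===== LEMMAS AND PROOFS =====

-- pvScanStop is a prefix of its input
lemma pvScanStop_prefix (stop cs : List Char) : pvScanStop stop cs <+: cs := by
  induction cs with
  | nil => simp [pvScanStop]
  | cons c cs ih =>
    simp only [pvScanStop]
    split
    · exact List.nil_prefix
    · exact List.cons_prefix_cons.mpr ⟨rfl, ih⟩

lemma pvScanStop_length_le (stop cs : List Char) : (pvScanStop stop cs).length ≤ cs.length :=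
  (pvScanStop_prefix stop cs).length_le

-- every character strictly before the scan's end is not a stop character
lemma pvScanStop_nonstop (stop cs : List Char) (i : Nat) (hi : i < (pvScanStop stop cs).length)
    (hl : i < cs.length) : cs[i] ∉ stop := by
  induction cs generalizing i with
  | nil => simp at hl
  | cons c cs ih =>
    simp only [pvScanStop] at hi
    by_cases h : c ∈ stop
    · simp [h] at hi
    · cases i with
      | zero => simpa using h
      | succ j =>
        rw [if_neg h] at hi
        simp only [List.length_cons] at hi hl
        simpa using ih j (by omega) (by omega)

-- if the scan stops early, the character at its end is a stop character
lemma pvScanStop_stop_at (stop cs : List Char) (h : (pvScanStop stop cs).length < cs.length) :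
    (cs[(pvScanStop stop cs).length]'h) ∈ stop := by
  induction cs with
  | nil => simp at h
  | cons c cs ih =>
    by_cases hc : c ∈ stop
    · simp [pvScanStop, hc]
    · have h' : (pvScanStop stop cs).length < cs.length := by
        simp only [pvScanStop, if_neg hc, List.length_cons] at h
        omega
      simpa [pvScanStop, hc] using ih h'

-- the fold never exceeds its initial accumulator
lemma pvFoldA_le_init (cs L : List Char) (e0 : Int) :
    L.foldl (fun e c => let pos := PySem.Chars.find cs [c];
      if pos ≠ -1 then min e pos else e) e0 ≤ e0 := by
  induction L generalizing e0 with
  | nil => simp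
  | cons c L ih =>
    simp only [List.foldl_cons]
    split
    · exact le_trans (ih _) (min_le_left _ _)
    · exact ih _

-- lower bound: if every contributing find is ≥ t and the start is ≥ t, so is the fold
lemma pvFoldA_ge (cs L : List Char) (t : Int)
    (h : ∀ c ∈ L, PySem.Chars.find cs [c] ≠ -1 → t ≤ PySem.Chars.find cs [c]) :
    ∀ e0 : Int, t ≤ e0 →
      t ≤ L.foldl (fun e c => let pos := PySem.Chars.find cs [c];
        if pos ≠ -1 then min e pos else e) e0 := by
  induction L with
  | nil => intro e0 h0; simpa
  | cons c L ih =>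
    intro e0 h0
    simp only [List.foldl_cons]
    split
    · exact ih (fun c hc => h c (by simp [hc])) _ (le_min h0 (h c (by simp) (by assumption)))
    · exact ih (fun c hc => h c (by simp [hc])) _ h0

-- upper bound: the fold is ≤ any contributing find of a member of L
lemma pvFoldA_le (cs L : List Char) (c : Char)
    (hf : PySem.Chars.find cs [c] ≠ -1) :
    ∀ e0 : Int, c ∈ L →
      L.foldl (fun e c => let pos := PySem.Chars.find cs [c];
        if pos ≠ -1 then min e pos else e) e0 ≤ PySem.Chars.find cs [c] := by
  induction L with
  | nil => intro e0 hc; simp at hc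
  | cons d L ih =>
    intro e0 hc
    simp only [List.foldl_cons]
    rcases List.mem_cons.mp hc with h | h
    · subst h
      rw [if_pos hf]
      exact le_trans (pvFoldA_le_init cs L _) (min_le_right _ _)
    · split
      · exact ih _ h
      · exact ih _ h

-- [c] is a prefix of l iff l starts with c
lemma pvSingleton_prefix (c : Char) (l : List Char) : [c] <+: l ↔ l.head? = some c := by
  cases l with
  | nil => simp
  | cons a l =>
    constructor
    · intro h
      rcases List.cons_prefix_cons.mp h with ⟨rfl, -⟩
      rfl
    · intro h
      simp only [List.head?_cons, Option.some.injEq] at h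
      exact List.cons_prefix_cons.mpr ⟨h.symm, List.nil_prefix⟩

-- find of a one-character needle succeeds iff the character occurs
lemma pvFind_singleton_ne (cs : List Char) (c : Char) :
    PySem.Chars.find cs [c] ≠ -1 ↔ c ∈ cs := by
  rw [PySem.Chars.find_ne_neg_one_iff]
  constructor
  · intro h
    exact List.singleton_sublist.mp h.sublist
  · intro h
    obtain ⟨s, t, rfl⟩ := List.append_of_mem h
    exact ⟨s, t, by simp⟩

-- where a successful single-character find points: the first occurrence of c
lemma pvFind_singleton_spec (cs : List Char) (c : Char) (h : 0 ≤ PySem.Chars.find cs [c]) :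
    cs[(PySem.Chars.find cs [c]).toNat]? = some c ∧
      ∀ i < (PySem.Chars.find cs [c]).toNat, cs[i]? ≠ some c := by
  obtain ⟨h1, h2⟩ := PySem.Chars.find_spec h
  constructor
  · rw [← List.head?_drop]
    exact (pvSingleton_prefix c _).mp h1
  · intro i hi hsome
    exact h2 i hi ((pvSingleton_prefix c _).mpr (by rw [List.head?_drop]; exact hsome))

-- core: A's min-over-finds cut equals B's single-pass scan
lemma pvCore (stop cs : List Char) :
    PySem.List.slice cs none (some (stop.foldl (fun e c =>
        let pos := PySem.Chars.find cs [c]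
        if pos ≠ -1 then min e pos else e) (cs.length : Int))) = pvScanStop stop cs := by
  set t := (pvScanStop stop cs).length with ht
  have htle : t ≤ cs.length := pvScanStop_length_le stop cs
  have hlow : (t : Int) ≤ stop.foldl (fun e c =>
      let pos := PySem.Chars.find cs [c]
      if pos ≠ -1 then min e pos else e) (cs.length : Int) := by
    apply pvFoldA_ge
    · intro c hc hne
      by_contra hlt
      have hnn : 0 ≤ PySem.Chars.find cs [c] := by
        have := PySem.Chars.neg_one_le_find cs [c]
        omega
      obtain ⟨hget, -⟩ := pvFind_singleton_spec cs c hnn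
      set k := (PySem.Chars.find cs [c]).toNat with hk
      have hkt : k < t := by omega
      have hkl : k < cs.length := by omega
      rw [List.getElem?_eq_getElem hkl, Option.some_inj] at hget
      have hns := pvScanStop_nonstop stop cs k hkt hkl
      rw [hget] at hns
      exact hns hc
    · exact_mod_cast htle
  have hhigh : stop.foldl (fun e c =>
      let pos := PySem.Chars.find cs [c]
      if pos ≠ -1 then min e pos else e) (cs.length : Int) ≤ (t : Int) := by
    rcases lt_or_eq_of_le htle with hlt | heq
    · have hc0mem := pvScanStop_stop_at stop cs hlt
      have hcs : (cs[t]'hlt) ∈ cs := List.getElem_mem hlt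
      have hne : PySem.Chars.find cs [cs[t]'hlt] ≠ -1 := (pvFind_singleton_ne cs _).mpr hcs
      have hnn : 0 ≤ PySem.Chars.find cs [cs[t]'hlt] := by
        have := PySem.Chars.neg_one_le_find cs [cs[t]'hlt]
        omega
      obtain ⟨-, hmin⟩ := pvFind_singleton_spec cs (cs[t]'hlt) hnn
      have hfle : PySem.Chars.find cs [cs[t]'hlt] ≤ (t : Int) := by
        by_contra hgt
        exact hmin t (by omega) (by rw [List.getElem?_eq_getElem hlt])
      exact le_trans (pvFoldA_le cs stop _ hne _ hc0mem) hfle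
    · rw [← heq]
      exact pvFoldA_le_init cs stop _
  have heqv : stop.foldl (fun e c =>
      let pos := PySem.Chars.find cs [c]
      if pos ≠ -1 then min e pos else e) (cs.length : Int) = (t : Int) := le_antisymm hhigh hlow
  rw [heqv, PySem.List.slice_to_natCast]
  exact (List.prefix_iff_eq_take.mp (pvScanStop_prefix stop cs)).symm

-- ===== VERDICT (by name: the statement is the Claim_ definition above) =====
theorem requirement_name_py_spec : Claim_equal_requirement_name_py := by
  intro requirement _
  show _ = _
  unfold requirement_name_py requirement_name_py_alt
  have hset : (PySem.Set.ofList [' ', '(', '[', '!', '<', '>', '=', '~', ';'] : List Char)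
      = [' ', '(', '[', '!', '<', '>', '=', '~', ';'] := by decide
  simp only [hset]
  rw [pvCore]
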